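-- pv_equiv track=rewrite | github.com/Denopia/haiku-maker | similarity_checker.py | pool_substrings
-- ===== SOURCE A (Python) =====
-- def pool_substrings(haiku_wto):
--     ss_pool = {}
--     for i in range(0,20):
--         ss_pool[i] = []
--     for a in range(0, len(haiku_wto)):
--         for b in range(a, len(haiku_wto)):
--             key = b-a+1
--             ss = substring_from_list(a, b, haiku_wto)
--             ss_pool[key].append(ss)
--
--     return ss_pool
--
-- def substring_from_list(a, b, haiku_wto):
--     ss = ""
--     for i in range(a,b+1):
--         ss = ss + haiku_wto[i] + " "
--     ss = ss[0:-1]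
--     return ss
-- ===== SOURCE B (Python) =====
-- def pool_substrings(haiku_wto):
--     ss_pool = {i: [] for i in range(0, 20)}
--     n = len(haiku_wto)
--     for a in range(0, n):
--         ss = haiku_wto[a]
--         ss_pool[1].append(ss)
--         for b in range(a + 1, n):
--             ss = ss + " " + haiku_wto[b]
--             ss_pool[b - a + 1].append(ss)
--     return ss_pool
-- ===== Notes on version B (the rewrite author's own statement) =====
-- stated objective: faster
-- what changed: Each substring is built incrementally by extending the previous one (ss = ss + ' ' + word) in a state-carrying inner loop, instead of re-concatenating words[a..b] from scratch via the substring_from_list helper (which also appends a trailing space and slices it off) for every pair; the dict is initialized by a comprehension, so words lists of 20+ still raise KeyError exactly as A does and are excluded by Pre_.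
import Mathlib
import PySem

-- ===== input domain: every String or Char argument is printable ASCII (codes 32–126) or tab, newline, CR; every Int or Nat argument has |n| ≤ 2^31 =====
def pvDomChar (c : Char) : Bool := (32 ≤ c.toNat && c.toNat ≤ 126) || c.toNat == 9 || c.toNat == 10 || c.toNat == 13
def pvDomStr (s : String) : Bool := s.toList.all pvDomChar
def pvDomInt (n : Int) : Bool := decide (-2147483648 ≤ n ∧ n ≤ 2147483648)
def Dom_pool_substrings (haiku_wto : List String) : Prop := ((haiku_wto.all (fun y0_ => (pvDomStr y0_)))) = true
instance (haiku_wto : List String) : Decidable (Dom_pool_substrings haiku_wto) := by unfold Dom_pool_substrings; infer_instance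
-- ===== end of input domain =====

-- B builds each substring by extending the previous one (ss = ss + ' ' + word) in a
-- state-carrying inner loop instead of re-concatenating words[a..b] from scratch via a helper,
-- doing less character copying; same nested enumeration of (a, b) pairs.

-- ===== PORT A =====
def substring_from_list (a b : Int) (haiku_wto : List String) : String :=
  let ss := (PySem.List.pyRange a (b + 1) 1).foldl
      (fun ss i => ss ++ PySem.List.pyGetD haiku_wto i "" ++ " ") ""
  PySem.Str.slice ss (some 0) (some (-1))

def pool_substrings (haiku_wto : List String) : List (Int × List String) :=
  let ss_pool : PySem.Dict Int (List String) :=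
    (PySem.List.pyRange 0 20 1).foldl (fun d i => d.insert i []) PySem.Dict.empty
  let ss_pool :=
    (PySem.List.pyRange 0 (PySem.List.len haiku_wto) 1).foldl (fun d a =>
      (PySem.List.pyRange a (PySem.List.len haiku_wto) 1).foldl (fun d b =>
        d.modify (b - a + 1) [] (· ++ [substring_from_list a b haiku_wto])) d) ss_pool
  ss_pool.items

-- ===== PORT B =====
def pool_substrings_alt (haiku_wto : List String) : List (Int × List String) :=
  let ss_pool : PySem.Dict Int (List String) :=
    (PySem.List.pyRange 0 20 1).foldl (fun d i => d.insert i []) PySem.Dict.empty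
  let n := PySem.List.len haiku_wto
  let ss_pool :=
    (PySem.List.pyRange 0 n 1).foldl (fun d a =>
      let ss := PySem.List.pyGetD haiku_wto a ""
      let d := d.modify 1 [] (· ++ [ss])
      ((PySem.List.pyRange (a + 1) n 1).foldl
        (fun (p : PySem.Dict Int (List String) × String) b =>
          let ss := p.2 ++ " " ++ PySem.List.pyGetD haiku_wto b ""
          (p.1.modify (b - a + 1) [] (· ++ [ss]), ss)) (d, ss)).1) ss_pool
  ss_pool.items

-- ===== PRECONDITION & SPEC =====
-- Pre_ excludes exactly the inputs with 20 or more words, on which the Python A raises KeyError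
-- (the pool dict only has keys 0..19).
def Pre_pool_substrings (haiku_wto : List String) : Prop := haiku_wto.length ≤ 19
instance (haiku_wto : List String) : Decidable (Pre_pool_substrings haiku_wto) := by
  unfold Pre_pool_substrings; infer_instance

def pvWitness_pool_substrings : List String := (["old", "pond", "frog"])

def Spec_pool_substrings (haiku_wto : List String) (out : List (Int × List String)) : Prop := out = pool_substrings_alt haiku_wto
instance (haiku_wto : List String) (out : List (Int × List String)) : Decidable (Spec_pool_substrings haiku_wto out) := by unfold Spec_pool_substrings; infer_instance

-- ===== CLAIM (what is proved, stated in full; the proofs are below) =====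
def Claim_equal_pool_substrings : Prop := ∀ (haiku_wto : List String), Dom_pool_substrings haiku_wto → Pre_pool_substrings haiku_wto → Spec_pool_substrings haiku_wto (pool_substrings haiku_wto)

-- ===== LEMMAS AND PROOFS =====

-- B's incrementally built string after the inner loop has reached index a + j.
def bstr (haiku_wto : List String) (a : Int) : Nat → String
  | 0 => PySem.List.pyGetD haiku_wto a ""
  | j + 1 => bstr haiku_wto a j ++ " " ++ PySem.List.pyGetD haiku_wto (a + j + 1) ""

-- A's pre-slice accumulator is B's string with one trailing space.
theorem astr_toList (haiku_wto : List String) (a : Int) (j : Nat) :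
    ((PySem.List.pyRange a (a + j + 1) 1).foldl
      (fun ss i => ss ++ PySem.List.pyGetD haiku_wto i "" ++ " ") "").toList
    = (bstr haiku_wto a j).toList ++ [' '] := by
  induction j with
  | zero =>
      rw [show a + (0:Nat) + 1 = a + 1 by omega,
        PySem.List.pyRange_one_cons (by omega : a < a + 1),
        show PySem.List.pyRange (a+1) (a+1) 1 = [] by simp]
      simp [bstr]
  | succ j ih =>
      rw [show a + (j+1:Nat) + 1 = (a + j + 1) + 1 by push_cast; ring,
        PySem.List.pyRange_one_succ_right (by omega : a ≤ a + j + 1),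
        List.foldl_append]
      simp only [List.foldl_cons, List.foldl_nil, bstr]
      rw [String.toList_append, String.toList_append, ih]
      simp

theorem substring_eq_bstr (haiku_wto : List String) (a : Int) (j : Nat) :
    substring_from_list a (a + j) haiku_wto = bstr haiku_wto a j := by
  apply String.toList_inj.mp
  unfold substring_from_list
  have h := astr_toList haiku_wto a j
  simp only [pysem] at h ⊢
  rw [h, List.dropLast_concat]

-- The two inner loops agree: A recomputes substring_from_list a b, B extends bstr.
theorem inner_eq (haiku_wto : List String) (n a : Int) :
    ∀ (t : Nat) (j : Nat) (b : Int) (d : PySem.Dict Int (List String)),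
    b = a + j + 1 → t = (n - b).toNat →
    (PySem.List.pyRange b n 1).foldl
      (fun d b => d.modify (b - a + 1) [] (· ++ [substring_from_list a b haiku_wto])) d
    = ((PySem.List.pyRange b n 1).foldl
        (fun (p : PySem.Dict Int (List String) × String) b =>
          let ss := p.2 ++ " " ++ PySem.List.pyGetD haiku_wto b ""
          (p.1.modify (b - a + 1) [] (· ++ [ss]), ss)) (d, bstr haiku_wto a j)).1 := by
  intro t
  induction t with
  | zero =>
      intro j b d hb ht
      rw [show PySem.List.pyRange b n 1 = [] by
        simp [PySem.List.pyRange_one, show (n - b).toNat = 0 by omega]]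
      rfl
  | succ t ih =>
      intro j b d hb ht
      by_cases hbn : b < n
      · rw [PySem.List.pyRange_one_cons hbn]
        simp only [List.foldl_cons]
        have hsub : substring_from_list a b haiku_wto = bstr haiku_wto a (j + 1) := by
          rw [show b = a + (j+1 : Nat) by push_cast; omega, substring_eq_bstr]
        have hext : bstr haiku_wto a j ++ " " ++ PySem.List.pyGetD haiku_wto b ""
            = bstr haiku_wto a (j + 1) := by
          rw [hb]; rfl
        rw [hsub]
        have := ih (j + 1) (b + 1)
          (d.modify (b - a + 1) [] (· ++ [bstr haiku_wto a (j + 1)]))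
          (by push_cast; omega) (by omega)
        rw [this, hext]
      · rw [show PySem.List.pyRange b n 1 = [] by
          simp [PySem.List.pyRange_one, show (n - b).toNat = 0 by omega]]
        rfl

-- ===== VERDICT (by name: the statement is the Claim_ definition above) =====
theorem pool_substrings_spec : Claim_equal_pool_substrings := by
  intro haiku_wto _ _
  unfold Spec_pool_substrings pool_substrings pool_substrings_alt
  apply congrArg PySem.Dict.items
  apply PySem.List.foldl_congr_mem
  intro d a ha
  have han : 0 ≤ a ∧ a < PySem.List.len haiku_wto := PySem.List.mem_pyRange_one.mp ha
  rw [PySem.List.pyRange_one_cons han.2]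
  simp only [List.foldl_cons]
  have h0 : substring_from_list a a haiku_wto = bstr haiku_wto a 0 := by
    have := substring_eq_bstr haiku_wto a 0
    simpa using this
  have hkey : a - a + 1 = (1 : Int) := by ring
  rw [hkey, h0]
  exact inner_eq haiku_wto (PySem.List.len haiku_wto) a
    ((PySem.List.len haiku_wto) - (a + 1)).toNat 0 (a + 1)
    (d.modify 1 [] (· ++ [bstr haiku_wto a 0])) (by ring) rfl
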